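-- pv_equiv track=rewrite | github.com/jinjinsansan/netkeita | api/main.py | _assign_marks_anaba
-- ===== SOURCE A (Python) =====
-- MARK_HONMEI = "◎"
--
-- MARK_TAIKOU = "○"
--
-- MARK_TANANA = "▲"
--
-- MARK_RENKA  = "△"
--
-- MARK_HOSHI  = "✖"
--
-- def _assign_marks_anaba(ev_sorted: list[dict], total_sorted: list[dict]) -> dict[str, str]:
--     """Assign marks for the contrarian character.
--
--     ◎ is NOT the #1 by total — picks from ev_sorted top that isn't
--     the overall favourite, creating interesting divergence.
--     """
--     marks: dict[str, str] = {}
--     top_fav_num = total_sorted[0]["horse_number"] if total_sorted else -1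
--     used: set[int] = set()
--
--     # ◎: First in ev_sorted that is NOT the overall favourite
--     for h in ev_sorted:
--         if h["horse_number"] != top_fav_num:
--             marks[str(h["horse_number"])] = MARK_HONMEI
--             used.add(h["horse_number"])
--             break
--     # ○: Next best in ev_sorted
--     for h in ev_sorted:
--         if h["horse_number"] not in used:
--             marks[str(h["horse_number"])] = MARK_TAIKOU
--             used.add(h["horse_number"])
--             break
--     # ▲: Next
--     for h in ev_sorted:
--         if h["horse_number"] not in used:
--             marks[str(h["horse_number"])] = MARK_TANANA
--             used.add(h["horse_number"])
--             break
--     # △: Next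
--     for h in ev_sorted:
--         if h["horse_number"] not in used:
--             marks[str(h["horse_number"])] = MARK_RENKA
--             used.add(h["horse_number"])
--             break
--     # ✖: The overall favourite (contrarian pick)
--     if top_fav_num not in used and len(ev_sorted) >= 5:
--         marks[str(top_fav_num)] = MARK_HOSHI
--
--     return marks
-- ===== SOURCE B (Python) =====
-- MARK_HONMEI = "◎"
-- MARK_TAIKOU = "○"
-- MARK_TANANA = "▲"
-- MARK_RENKA  = "△"
-- MARK_HOSHI  = "✖"
--
-- def _assign_marks_anaba(ev_sorted: list[dict], total_sorted: list[dict]) -> dict[str, str]: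
--     """One dedup pass over ev_sorted, then positional assignment of the marks."""
--     fav = total_sorted[0]["horse_number"] if total_sorted else -1
--     order = list(dict.fromkeys(h["horse_number"] for h in ev_sorted))
--     marks: dict[str, str] = {}
--     honmei = next((n for n in order if n != fav), None)
--     if honmei is not None:
--         marks[str(honmei)] = MARK_HONMEI
--         order.remove(honmei)
--     for n, m in zip(order, (MARK_TAIKOU, MARK_TANANA, MARK_RENKA)):
--         marks[str(n)] = m
--     if fav not in order[:3] and len(ev_sorted) >= 5:
--         marks[str(fav)] = MARK_HOSHI
--     return marks
-- ===== Notes on version B (the rewrite author's own statement) =====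
-- stated objective: simpler
-- what changed: A's five full scans of ev_sorted, each guarded by a growing `used` set, are replaced by one dedup pass that builds the distinct horse numbers in first-seen order, after which ◎/○/▲/△/✖ are assigned positionally from that list.
import Mathlib
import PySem

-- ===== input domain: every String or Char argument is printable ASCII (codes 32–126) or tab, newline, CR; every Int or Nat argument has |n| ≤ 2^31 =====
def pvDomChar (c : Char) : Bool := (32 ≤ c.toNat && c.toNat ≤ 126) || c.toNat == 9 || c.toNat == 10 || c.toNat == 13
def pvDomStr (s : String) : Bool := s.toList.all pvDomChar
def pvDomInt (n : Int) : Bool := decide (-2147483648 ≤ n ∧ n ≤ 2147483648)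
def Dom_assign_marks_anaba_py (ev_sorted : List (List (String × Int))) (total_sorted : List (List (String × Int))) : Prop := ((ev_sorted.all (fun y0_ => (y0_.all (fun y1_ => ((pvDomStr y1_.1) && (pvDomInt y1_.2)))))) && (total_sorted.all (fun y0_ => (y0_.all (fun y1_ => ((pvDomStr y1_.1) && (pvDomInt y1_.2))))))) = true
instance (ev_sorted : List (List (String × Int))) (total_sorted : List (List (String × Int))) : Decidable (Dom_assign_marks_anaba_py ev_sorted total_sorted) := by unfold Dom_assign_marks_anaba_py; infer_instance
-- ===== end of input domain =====

-- B replaces A's five full scans of ev_sorted (each guarded by a growing `used` set) by one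
-- dedup pass building the distinct horse numbers in first-seen order, then assigns the marks
-- positionally (objective: simpler).

-- ===== PORT A =====
-- h["horse_number"] (dict lookup = first match in the association list; the default 0 is only
-- reached outside Pre_, where the Python raises KeyError)
def hnP (h : List (String × Int)) : Int := (List.lookup "horse_number" h).getD 0

-- one `for h in ev_sorted: if p(h["horse_number"]): mark it; add to used; break` loop of A
def markLoop (ev : List (List (String × Int))) (p : Int → Bool) (mark : String)
    (marks : PySem.Dict String String) (used : List Int) :
    PySem.Dict String String × List Int :=
  match ev with
  | [] => (marks, used)
  | h :: t =>
    if p (hnP h) then (marks.insert (PySem.Int.toStr (hnP h)) mark, PySem.Set.add used (hnP h))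
    else markLoop t p mark marks used

def assign_marks_anaba_py (ev_sorted : List (List (String × Int))) (total_sorted : List (List (String × Int))) : List (String × String) :=
  let top_fav_num : Int := match total_sorted with | [] => -1 | h :: _ => hnP h
  let r1 := markLoop ev_sorted (fun n => n != top_fav_num) "◎" PySem.Dict.empty PySem.Set.empty
  let r2 := markLoop ev_sorted (fun n => !(PySem.Set.contains r1.2 n)) "○" r1.1 r1.2
  let r3 := markLoop ev_sorted (fun n => !(PySem.Set.contains r2.2 n)) "▲" r2.1 r2.2
  let r4 := markLoop ev_sorted (fun n => !(PySem.Set.contains r3.2 n)) "△" r3.1 r3.2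
  let m5 := if !(PySem.Set.contains r4.2 top_fav_num) && decide (ev_sorted.length ≥ 5)
            then r4.1.insert (PySem.Int.toStr top_fav_num) "✖" else r4.1
  m5.items

-- ===== PORT B =====
def assign_marks_anaba_py_alt (ev_sorted : List (List (String × Int))) (total_sorted : List (List (String × Int))) : List (String × String) :=
  let fav : Int := match total_sorted with | [] => -1 | h :: _ => hnP h
  let order := PySem.List.dedup (ev_sorted.map hnP)        -- list(dict.fromkeys(...))
  let honmei := order.find? (fun n => n != fav)            -- next((n for n in order if n != fav), None)
  let mo :=
    match honmei with
    | none => ((PySem.Dict.empty : PySem.Dict String String), order)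
    | some n => (PySem.Dict.empty.insert (PySem.Int.toStr n) "◎", order.erase n)
  let marks := (mo.2.zip ["○", "▲", "△"]).foldl
    (fun m p => m.insert (PySem.Int.toStr p.1) p.2) mo.1
  let marks := if !((mo.2.take 3).contains fav) && decide (ev_sorted.length ≥ 5)
               then marks.insert (PySem.Int.toStr fav) "✖" else marks
  marks.items

-- ===== PRECONDITION & SPEC =====
-- Pre_ requires the "horse_number" key in every ev_sorted dict and in total_sorted[0] (the only
-- total_sorted entry A reads): where A touches a dict lacking it, A raises KeyError; A can also
-- return despite a missing key in an ev_sorted dict its four loops break before reaching (B's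
-- single dedup pass reads every ev_sorted dict and raises there) — Pre_ excludes those few
-- inputs too, see the cites in the claim.
def Pre_assign_marks_anaba_py (ev_sorted : List (List (String × Int))) (total_sorted : List (List (String × Int))) : Prop :=
  (ev_sorted.all (fun h => (List.lookup "horse_number" h).isSome)
    && (match total_sorted with
        | [] => true
        | h :: _ => (List.lookup "horse_number" h).isSome)) = true
instance (ev_sorted : List (List (String × Int))) (total_sorted : List (List (String × Int))) : Decidable (Pre_assign_marks_anaba_py ev_sorted total_sorted) := by unfold Pre_assign_marks_anaba_py; infer_instance

def pvWitness_assign_marks_anaba_py : (List (List (String × Int))) × (List (List (String × Int))) :=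
  ([[("horse_number", 3)], [("horse_number", 1)], [("horse_number", 2)], [("horse_number", 4)], [("horse_number", 5)]],
   [[("horse_number", 3)]])

def Spec_assign_marks_anaba_py (ev_sorted : List (List (String × Int))) (total_sorted : List (List (String × Int))) (out : List (String × String)) : Prop := out = assign_marks_anaba_py_alt ev_sorted total_sorted
instance (ev_sorted : List (List (String × Int))) (total_sorted : List (List (String × Int))) (out : List (String × String)) : Decidable (Spec_assign_marks_anaba_py ev_sorted total_sorted out) := by unfold Spec_assign_marks_anaba_py; infer_instance

-- ===== CLAIM (what is proved, stated in full; the proofs are below) =====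
def Claim_equal_assign_marks_anaba_py : Prop := ∀ (ev_sorted : List (List (String × Int))) (total_sorted : List (List (String × Int))), Dom_assign_marks_anaba_py ev_sorted total_sorted → Pre_assign_marks_anaba_py ev_sorted total_sorted → Spec_assign_marks_anaba_py ev_sorted total_sorted (assign_marks_anaba_py ev_sorted total_sorted)

-- ===== LEMMAS AND PROOFS =====

-- A's for/break loop is "find the first horse number satisfying p, then mark it"
theorem markLoop_eq (ev : List (List (String × Int))) (p : Int → Bool) (mark : String)
    (marks : PySem.Dict String String) (used : List Int) :
    markLoop ev p mark marks used =
      match (ev.map hnP).find? p with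
      | none => (marks, used)
      | some n => (marks.insert (PySem.Int.toStr n) mark, PySem.Set.add used n) := by
  induction ev with
  | nil => rfl
  | cons h t ih =>
    by_cases hp : p (hnP h) = true
    · simp [markLoop, hp]
    · simp only [Bool.not_eq_true] at hp
      simp [markLoop, hp, ih]

-- the dedup fold only ever appends
theorem foldl_add_prefix (xs acc : List Int) :
    ∃ r, xs.foldl PySem.Set.add acc = acc ++ r := by
  induction xs generalizing acc with
  | nil => exact ⟨[], by simp⟩
  | cons x t ih =>
    by_cases hc : x ∈ acc
    · have : PySem.Set.add acc x = acc := by simp [PySem.Set.add, PySem.Set.contains, hc]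
      simpa [this] using ih acc
    · have h1 : PySem.Set.add acc x = acc ++ [x] := by
        simp [PySem.Set.add, PySem.Set.contains, hc]
      obtain ⟨r, hr⟩ := ih (acc ++ [x])
      exact ⟨x :: r, by simp [h1, hr]⟩

-- the first element of the dedup list satisfying p is the first element of the list satisfying p
theorem find?_foldl_add (xs : List Int) (p : Int → Bool) :
    ∀ acc : List Int, (∀ a ∈ acc, p a = false) →
      (xs.foldl PySem.Set.add acc).find? p = xs.find? p := by
  induction xs with
  | nil =>
    intro acc hacc
    simpa using List.find?_eq_none.mpr (by intro x hx; simp [hacc x hx])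
  | cons x t ih =>
    intro acc hacc
    by_cases hc : x ∈ acc
    · have hadd : PySem.Set.add acc x = acc := by simp [PySem.Set.add, PySem.Set.contains, hc]
      have hpx : p x = false := hacc x hc
      simp [hadd, ih acc hacc, hpx]
    · have hadd : PySem.Set.add acc x = acc ++ [x] := by
        simp [PySem.Set.add, PySem.Set.contains, hc]
      by_cases hpx : p x = true
      · obtain ⟨r, hr⟩ := foldl_add_prefix t (acc ++ [x])
        have hn : acc.find? p = none := List.find?_eq_none.mpr (by intro a ha; simp [hacc a ha])
        simp [hadd, hr, List.find?_append, hn, hpx]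
      · simp only [Bool.not_eq_true] at hpx
        have hacc' : ∀ a ∈ acc ++ [x], p a = false := by
          intro a ha
          rcases List.mem_append.mp ha with h | h
          · exact hacc a h
          · simp at h; subst h; exact hpx
        simp [hadd, ih (acc ++ [x]) hacc', hpx]

theorem find?_dedup (xs : List Int) (p : Int → Bool) :
    (PySem.List.dedup xs).find? p = xs.find? p := by
  have h : PySem.List.dedup xs = xs.foldl PySem.Set.add [] := by
    simp [PySem.List.dedup_eq_ofList, PySem.Set.ofList_eq_foldl]
  rw [h, find?_foldl_add xs p [] (by intro a ha; simp at ha)]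


-- core equivalence, with the favourite number abstracted
theorem key (ev : List (List (String × Int))) (fav : Int) :
    (let r1 := markLoop ev (fun n => n != fav) "◎" PySem.Dict.empty PySem.Set.empty
     let r2 := markLoop ev (fun n => !(PySem.Set.contains r1.2 n)) "○" r1.1 r1.2
     let r3 := markLoop ev (fun n => !(PySem.Set.contains r2.2 n)) "▲" r2.1 r2.2
     let r4 := markLoop ev (fun n => !(PySem.Set.contains r3.2 n)) "△" r3.1 r3.2
     let m5 := if !(PySem.Set.contains r4.2 fav) && decide (ev.length ≥ 5)
               then r4.1.insert (PySem.Int.toStr fav) "✖" else r4.1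
     m5.items) =
    (let order := PySem.List.dedup (ev.map hnP)
     let honmei := order.find? (fun n => n != fav)
     let mo := match honmei with
       | none => ((PySem.Dict.empty : PySem.Dict String String), order)
       | some n => (PySem.Dict.empty.insert (PySem.Int.toStr n) "◎", order.erase n)
     let marks := (mo.2.zip ["○", "▲", "△"]).foldl (fun m p => m.insert (PySem.Int.toStr p.1) p.2) mo.1
     let marks := if !((mo.2.take 3).contains fav) && decide (ev.length ≥ 5)
                  then marks.insert (PySem.Int.toStr fav) "✖" else marks
     marks.items) := by
  have hmemds : ∀ x, x ∈ PySem.List.dedup (ev.map hnP) ↔ x ∈ ev.map hnP := by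
    intro x; exact PySem.List.mem_dedup (ev.map hnP) x
  have hnd0 : (PySem.List.dedup (ev.map hnP)).Nodup := PySem.List.nodup_dedup _
  have hfd : ∀ p : Int → Bool, (ev.map hnP).find? p = (PySem.List.dedup (ev.map hnP)).find? p :=
    fun p => (find?_dedup _ p).symm
  generalize hds : PySem.List.dedup (ev.map hnP) = ds at hmemds hnd0 hfd ⊢
  simp only [markLoop_eq, hfd]
  rcases hfind1 : ds.find? (fun n => n != fav) with _ | h
  · -- no ◎: every distinct number equals the favourite, so ds = [] or [fav]
    have hall : ∀ x ∈ ds, x = fav := by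
      intro x hx
      have := List.find?_eq_none.mp hfind1 x hx
      simpa using this
    match ds, hall, hnd0, hmemds, hfind1 with
    | [], _, _, hmemds, hfind1 =>
      have hev : ev = [] := by
        cases hevc : ev with
        | nil => rfl
        | cons e t => exact absurd ((hmemds (hnP e)).mpr (by simp [hevc])) (by simp)
      subst hev
      simp [PySem.Set.contains, PySem.Set.empty]
    | [x], hall, _, _, hfind1 =>
      have hx : x = fav := hall x (by simp)
      subst hx
      simp [PySem.Set.contains, PySem.Set.empty, PySem.Set.add]
    | x :: y :: tl, hall, hnd0, _, _ =>
      exact absurd (hall x (by simp) |>.trans (hall y (by simp)).symm)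
        (by simp at hnd0; intro hxy; exact hnd0.1.1 (hxy ▸ rfl) |>.elim)
  · -- ◎ goes to h, the first distinct number ≠ fav
    have hmemh : h ∈ ds := List.mem_of_find?_eq_some hfind1
    have hneh : h ≠ fav := by have := List.find?_some hfind1; simpa using this
    have hnoth : h ∉ ds.erase h := List.Nodup.not_mem_erase hnd0
    have hndR : (ds.erase h).Nodup := hnd0.erase h
    have hu1 : PySem.Set.add PySem.Set.empty h = [h] := by
      simp [PySem.Set.add, PySem.Set.empty, PySem.Set.contains]
    have hf2 : ds.find? (fun n => !(PySem.Set.contains [h] n)) = (ds.erase h).head? := by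
      have hp : (fun n : Int => !(PySem.Set.contains [h] n)) = (fun n => n != h) := by
        funext n; by_cases h1 : n = h <;> simp [PySem.Set.contains, h1]
      rw [hp, hnd0.erase_eq_filter h]
      exact (List.head?_filter).symm
    dsimp only
    simp only [hu1, hf2]
    by_cases hnil : ds.erase h = []
    · -- only the favourite left after ◎: no further marks from the loops
      simp only [hnil, List.head?_nil] at hf2
      simp only [hnil, List.head?_nil]
      repeat simp only [hf2]
      simp [PySem.Set.contains, Ne.symm hneh]
    · obtain ⟨a, R2, hR⟩ := List.exists_cons_of_ne_nil hnil
      simp only [hR, List.head?_cons]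
      rw [hR] at hndR
      have haR : a ∈ ds.erase h := by rw [hR]; exact List.mem_cons_self
      have hah : a ≠ h := fun e => hnoth (e ▸ haR)
      have hu2 : PySem.Set.add [h] a = [h, a] := by
        simp [PySem.Set.add, PySem.Set.contains, hah]
      have hnaR2 : a ∉ R2 := by simp at hndR; exact hndR.1
      have hf3 : ds.find? (fun n => !(PySem.Set.contains [h, a] n)) = R2.head? := by
        have hp : (fun n : Int => !(PySem.Set.contains [h, a] n))
            = (fun n => (n != a) && (n != h)) := by
          funext n
          by_cases h1 : n = h <;> by_cases h2 : n = a <;> simp [PySem.Set.contains, h1, h2]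
        rw [hp, ← (List.head?_filter (p := fun n => (n != a) && (n != h))),
            ← List.filter_filter, ← hnd0.erase_eq_filter h, hR]
        have hfa : List.filter (fun n => n != a) (a :: R2) = R2 := by
          have h0 : ∀ y ∈ R2, (y != a) = true := by
            intro y hy; simp; exact fun e => hnaR2 (e ▸ hy)
          simp [List.filter_eq_self.mpr h0]
        rw [hfa]
      simp only [hu2, hf3]
      cases R2 with
      | nil =>
        simp only [List.head?_nil] at hf3 ⊢
        repeat simp only [hf3]
        simp [PySem.Set.contains, Ne.symm hneh]
      | cons b R3 =>
        simp only [List.head?_cons] at hf3 ⊢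
        have hbR : b ∈ ds.erase h := by rw [hR]; exact List.mem_cons_of_mem _ List.mem_cons_self
        have hbh : b ≠ h := fun e => hnoth (e ▸ hbR)
        have hba : b ≠ a := fun e => hnaR2 (e ▸ List.mem_cons_self)
        have hu3 : PySem.Set.add [h, a] b = [h, a, b] := by
          simp [PySem.Set.add, PySem.Set.contains, hbh, hba]
        have hnbR3 : b ∉ R3 := by simp at hndR; exact hndR.2.1
        have hf4 : ds.find? (fun n => !(PySem.Set.contains [h, a, b] n)) = R3.head? := by
          have hp : (fun n : Int => !(PySem.Set.contains [h, a, b] n))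
              = (fun n => (n != b) && ((n != a) && (n != h))) := by
            funext n
            by_cases h1 : n = h <;> by_cases h2 : n = a <;> by_cases h3 : n = b <;>
              simp [PySem.Set.contains, h1, h2, h3]
          rw [hp, ← (List.head?_filter (p := fun n => (n != b) && ((n != a) && (n != h)))),
              ← List.filter_filter, ← List.filter_filter, ← hnd0.erase_eq_filter h, hR]
          have h5 : List.filter (fun n => n != a) (a :: b :: R3) = b :: R3 := by
            have h0 : ∀ y ∈ b :: R3, (y != a) = true := by
              intro y hy; simp; exact fun e => hnaR2 (e ▸ hy)
            simp [List.filter_eq_self.mpr h0]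
          rw [h5]
          have h6 : List.filter (fun n => n != b) (b :: R3) = R3 := by
            have h0 : ∀ y ∈ R3, (y != b) = true := by
              intro y hy; simp; exact fun e => hnbR3 (e ▸ hy)
            simp [List.filter_eq_self.mpr h0]
          rw [h6]
        simp only [hu3, hf4]
        cases R3 with
        | nil =>
          simp only [List.head?_nil] at hf4 ⊢
          simp [PySem.Set.contains, Ne.symm hneh]
        | cons c R4 =>
          simp only [List.head?_cons] at hf4 ⊢
          have hcR : c ∈ ds.erase h := by
            rw [hR]
            exact List.mem_cons_of_mem _ (List.mem_cons_of_mem _ List.mem_cons_self)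
          have hch : c ≠ h := fun e => hnoth (e ▸ hcR)
          have hca : c ≠ a := fun e => hnaR2 (e ▸ List.mem_cons_of_mem _ List.mem_cons_self)
          have hcb : c ≠ b := fun e => hnbR3 (e ▸ List.mem_cons_self)
          have hu4 : PySem.Set.add [h, a, b] c = [h, a, b, c] := by
            simp [PySem.Set.add, PySem.Set.contains, hch, hca, hcb]
          simp only [hu4]
          simp [PySem.Set.contains, Ne.symm hneh, List.zip]

-- ===== VERDICT (by name: the statement is the Claim_ definition above) =====
theorem assign_marks_anaba_py_spec : Claim_equal_assign_marks_anaba_py := by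
  intro ev_sorted total_sorted _ _
  unfold Spec_assign_marks_anaba_py assign_marks_anaba_py assign_marks_anaba_py_alt
  cases total_sorted with
  | nil => exact key ev_sorted (-1)
  | cons h t => exact key ev_sorted (hnP h)
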